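-- pv_equiv track=rewrite | github.com/LMU-Douglas/ps6-BrandonP1611 | test_problem_1.py | is_power_balanced
-- ===== SOURCE A (Python) =====
-- def is_power_balanced(n, party_affiliations):
--     # Counting how many legislators belong to each party
--     counts = {1: 0, 2: 0, 3: 0}
--     party_list = list(map(int, party_affiliations.split()))
--
--     for party in party_list:
--         counts[party] += 1
--
--     # Checking each party to see if it dominates
--     if counts[1] > counts[2] + counts[3]:
--         return "Future One Dominates"
--     elif counts[2] > counts[1] + counts[3]:
--         return "Two-gether Dominates"
--     elif counts[3] > counts[1] + counts[2]:
--         return "Triple Harmony Dominates"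
--     else:
--         return "Power Balanced"
-- ===== SOURCE B (Python) =====
-- def is_power_balanced(n, party_affiliations):
--     # Boyer-Moore majority vote: a party dominates iff it holds a strict
--     # majority of all seats, so find the only possible majority candidate
--     # with O(1) extra state, then verify it with one count.
--     parties = [int(t) for t in party_affiliations.split()]
--     cand, votes = 0, 0
--     for p in parties:
--         if votes == 0:
--             cand, votes = p, 1
--         elif p == cand:
--             votes += 1
--         else:
--             votes -= 1
--     if votes > 0 and 2 * parties.count(cand) > len(parties):
--         return {1: "Future One Dominates",
--                 2: "Two-gether Dominates",
--                 3: "Triple Harmony Dominates"}[cand]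
--     return "Power Balanced"
-- ===== Notes on version B (the rewrite author's own statement) =====
-- stated objective: alternative
-- what changed: Replaces A's per-party count dictionary and three-branch additive dominance cascade by the Boyer-Moore majority-vote algorithm (single candidate/votes pair, O(1) extra state) followed by one verification count and a strict-majority test.
import Mathlib
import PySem

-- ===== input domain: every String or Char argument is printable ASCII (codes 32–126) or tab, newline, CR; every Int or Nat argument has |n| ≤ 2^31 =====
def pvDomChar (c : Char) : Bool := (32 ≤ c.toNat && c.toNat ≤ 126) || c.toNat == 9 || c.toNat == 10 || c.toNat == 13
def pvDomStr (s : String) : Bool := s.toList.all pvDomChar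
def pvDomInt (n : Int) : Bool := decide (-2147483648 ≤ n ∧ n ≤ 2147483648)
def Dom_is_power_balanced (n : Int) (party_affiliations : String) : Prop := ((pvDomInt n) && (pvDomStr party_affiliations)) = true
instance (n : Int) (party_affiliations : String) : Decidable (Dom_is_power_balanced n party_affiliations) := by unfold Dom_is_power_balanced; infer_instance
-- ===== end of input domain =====

-- B replaces A's per-party count table and three-branch cascade by Boyer-Moore majority vote
-- (candidate/votes pair) plus one verification count (alternative algorithm; same cost).

-- ===== PORT A =====
def is_power_balanced (n : Int) (party_affiliations : String) : String :=
  let counts0 : PySem.Dict Int Int :=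
    (((PySem.Dict.empty).insert 1 0).insert 2 0).insert 3 0
  -- int(t): ofStr? is exact; Pre_ guarantees every token parses, so getD 0 is never taken
  let party_list : List Int :=
    (PySem.Str.split₀ party_affiliations).map (fun t => (PySem.Int.ofStr? t).getD 0)
  -- counts[party] += 1 : Pre_ guarantees the key is present (KeyError excluded), so modify with default 0 is exact
  let counts := party_list.foldl (fun d p => d.modify p 0 (· + 1)) counts0
  if counts.getD 1 0 > counts.getD 2 0 + counts.getD 3 0 then "Future One Dominates"
  else if counts.getD 2 0 > counts.getD 1 0 + counts.getD 3 0 then "Two-gether Dominates"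
  else if counts.getD 3 0 > counts.getD 1 0 + counts.getD 2 0 then "Triple Harmony Dominates"
  else "Power Balanced"

-- ===== PORT B =====
-- the body of B's for-loop (Boyer-Moore voting step)
def pvStep (st : Int × Int) (p : Int) : Int × Int :=
  if st.2 == 0 then (p, 1)
  else if p == st.1 then (st.1, st.2 + 1)
  else (st.1, st.2 - 1)

def is_power_balanced_alt (n : Int) (party_affiliations : String) : String :=
  let parties : List Int :=
    (PySem.Str.split₀ party_affiliations).map (fun t => (PySem.Int.ofStr? t).getD 0)
  let st := parties.foldl pvStep (0, 0)
  -- names[cand]: Pre_ guarantees cand ∈ {1,2,3} whenever this branch is taken, so getD is exact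
  if st.2 > 0 ∧ 2 * (parties.count st.1 : Int) > (parties.length : Int) then
    ((((PySem.Dict.empty).insert 1 "Future One Dominates").insert 2 "Two-gether Dominates").insert 3 "Triple Harmony Dominates" : PySem.Dict Int String).getD st.1 ""
  else "Power Balanced"

-- ===== PRECONDITION & SPEC =====
-- Pre_ excludes inputs where A raises: a token that is not an int literal (ValueError, B raises too)
-- or one that parses to a party outside {1,2,3} (KeyError in counts[party] += 1).
def Pre_is_power_balanced (n : Int) (party_affiliations : String) : Prop :=
  ∀ t ∈ PySem.Str.split₀ party_affiliations,
    PySem.Int.ofStr? t = some 1 ∨ PySem.Int.ofStr? t = some 2 ∨ PySem.Int.ofStr? t = some 3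
instance (n : Int) (party_affiliations : String) : Decidable (Pre_is_power_balanced n party_affiliations) := by
  unfold Pre_is_power_balanced; infer_instance
def pvWitness_is_power_balanced : Int × String := (5, "1 2 3 1 1")

def Spec_is_power_balanced (n : Int) (party_affiliations : String) (out : String) : Prop := out = is_power_balanced_alt n party_affiliations
instance (n : Int) (party_affiliations : String) (out : String) : Decidable (Spec_is_power_balanced n party_affiliations out) := by unfold Spec_is_power_balanced; infer_instance

-- ===== CLAIM (what is proved, stated in full; the proofs are below) =====
def Claim_equal_is_power_balanced : Prop := ∀ (n : Int) (party_affiliations : String), Dom_is_power_balanced n party_affiliations → Pre_is_power_balanced n party_affiliations → Spec_is_power_balanced n party_affiliations (is_power_balanced n party_affiliations)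

-- ===== LEMMAS AND PROOFS =====

-- a list all of whose elements are 1, 2 or 3 has length = count 1 + count 2 + count 3
lemma pv_length_eq_counts (l : List Int) (h : ∀ x ∈ l, x = 1 ∨ x = 2 ∨ x = 3) :
    l.length = l.count 1 + l.count 2 + l.count 3 := by
  induction l with
  | nil => simp
  | cons a t ih =>
    have ha := h a (by simp)
    have ht := ih (fun x hx => h x (by simp [hx]))
    rcases ha with rfl | rfl | rfl <;> simp [ht] <;> omega

-- single-step equations for pvStep (used so foldl over pvStep stays folded)
lemma pvStep_zero (c0 p : Int) : pvStep (c0, 0) p = (p, 1) := by simp [pvStep]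
lemma pvStep_hit (c0 v0 p : Int) (hv : v0 ≠ 0) (hp : p = c0) :
    pvStep (c0, v0) p = (c0, v0 + 1) := by simp [pvStep, hv, hp]
lemma pvStep_miss (c0 v0 p : Int) (hv : v0 ≠ 0) (hp : p ≠ c0) :
    pvStep (c0, v0) p = (c0, v0 - 1) := by simp [pvStep, hv, hp]

-- the vote counter never goes negative
lemma pv_bm_nonneg (l : List Int) : ∀ (c0 v0 : Int), 0 ≤ v0 → 0 ≤ (l.foldl pvStep (c0, v0)).2 := by
  induction l with
  | nil => intro c0 v0 h; simpa using h
  | cons a t ih =>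
    intro c0 v0 h
    rw [List.foldl_cons]
    by_cases hv : v0 = 0
    · rw [hv, pvStep_zero]; exact ih a 1 (by norm_num)
    · by_cases ha : a = c0
      · rw [pvStep_hit c0 v0 a hv ha]; exact ih c0 (v0 + 1) (by omega)
      · rw [pvStep_miss c0 v0 a hv ha]; exact ih c0 (v0 - 1) (by omega)

-- Boyer-Moore invariant: twice any value's count is bounded by length plus its signed vote share
lemma pv_bm_inv (l : List Int) : ∀ (c0 v0 m : Int), 0 ≤ v0 →
    2 * (l.count m : Int) + (if m = c0 then v0 else -v0) ≤
      (l.length : Int) +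
        (if m = (l.foldl pvStep (c0, v0)).1 then (l.foldl pvStep (c0, v0)).2
         else -(l.foldl pvStep (c0, v0)).2) := by
  induction l with
  | nil => intro c0 v0 m h; simp
  | cons a t ih =>
    intro c0 v0 m h
    rw [List.foldl_cons]
    simp only [List.count_cons, List.length_cons, beq_iff_eq]
    by_cases hv : v0 = 0
    · rw [hv, pvStep_zero]
      have H := ih a 1 m (by norm_num)
      push_cast
      split_ifs at H ⊢ <;> omega
    · by_cases ha : a = c0
      · rw [pvStep_hit c0 v0 a hv ha]
        have H := ih c0 (v0 + 1) m (by omega)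
        subst ha
        push_cast
        split_ifs at H ⊢ <;> omega
      · rw [pvStep_miss c0 v0 a hv ha]
        have H := ih c0 (v0 - 1) m (by omega)
        push_cast
        split_ifs at H ⊢ <;> omega

-- the final candidate is the initial one or an element of the list
lemma pv_bm_mem (l : List Int) : ∀ (c0 v0 : Int),
    (l.foldl pvStep (c0, v0)).1 = c0 ∨ (l.foldl pvStep (c0, v0)).1 ∈ l := by
  induction l with
  | nil => intro c0 v0; left; rfl
  | cons a t ih =>
    intro c0 v0
    rw [List.foldl_cons]
    by_cases hv : v0 = 0
    · rw [hv, pvStep_zero]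
      rcases ih a 1 with h | h
      · right; rw [h]; exact List.mem_cons_self
      · right; exact List.mem_cons_of_mem a h
    · by_cases ha : a = c0
      · rw [pvStep_hit c0 v0 a hv ha]
        rcases ih c0 (v0 + 1) with h | h
        · left; exact h
        · right; exact List.mem_cons_of_mem a h
      · rw [pvStep_miss c0 v0 a hv ha]
        rcases ih c0 (v0 - 1) with h | h
        · left; exact h
        · right; exact List.mem_cons_of_mem a h

-- a strict-majority element is the final Boyer-Moore candidate, with positive votes
lemma pv_bm_major (l : List Int) (m : Int) (hmaj : 2 * (l.count m : Int) > (l.length : Int)) :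
    (l.foldl pvStep ((0 : Int), (0 : Int))).1 = m ∧ 0 < (l.foldl pvStep ((0 : Int), (0 : Int))).2 := by
  have hinv := pv_bm_inv l 0 0 m le_rfl
  have hnn := pv_bm_nonneg l 0 0 le_rfl
  by_cases hc : m = (l.foldl pvStep ((0 : Int), (0 : Int))).1
  · refine ⟨hc.symm, ?_⟩
    rw [if_pos hc] at hinv
    simp at hinv
    omega
  · rw [if_neg hc] at hinv
    simp at hinv
    omega

-- ===== VERDICT (by name: the statement is the Claim_ definition above) =====
theorem is_power_balanced_spec : Claim_equal_is_power_balanced := by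
  intro n s _ hpre
  unfold Spec_is_power_balanced is_power_balanced is_power_balanced_alt
  simp only []
  set l : List Int := (PySem.Str.split₀ s).map (fun t => (PySem.Int.ofStr? t).getD 0) with hl
  have hmem : ∀ x ∈ l, x = 1 ∨ x = 2 ∨ x = 3 := by
    intro x hx
    rw [hl] at hx
    rcases List.mem_map.mp hx with ⟨t, ht, rfl⟩
    rcases hpre t ht with h | h | h <;> simp [h]
  have hlen : l.length = l.count 1 + l.count 2 + l.count 3 := pv_length_eq_counts l hmem
  have e1 : ((((PySem.Dict.empty : PySem.Dict Int Int).insert 1 0).insert 2 0).insert 3 0).getD 1 0 = 0 := by decide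
  have e2 : ((((PySem.Dict.empty : PySem.Dict Int Int).insert 1 0).insert 2 0).insert 3 0).getD 2 0 = 0 := by decide
  have e3 : ((((PySem.Dict.empty : PySem.Dict Int Int).insert 1 0).insert 2 0).insert 3 0).getD 3 0 = 0 := by decide
  simp only [PySem.Dict.getD_foldl_modify_add_one, e1, e2, e3, zero_add]
  set st := l.foldl pvStep ((0 : Int), (0 : Int)) with hst
  have n1 : ((((PySem.Dict.empty : PySem.Dict Int String).insert 1 "Future One Dominates").insert 2 "Two-gether Dominates").insert 3 "Triple Harmony Dominates").getD 1 "" = "Future One Dominates" := by decide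
  have n2 : ((((PySem.Dict.empty : PySem.Dict Int String).insert 1 "Future One Dominates").insert 2 "Two-gether Dominates").insert 3 "Triple Harmony Dominates").getD 2 "" = "Two-gether Dominates" := by decide
  have n3 : ((((PySem.Dict.empty : PySem.Dict Int String).insert 1 "Future One Dominates").insert 2 "Two-gether Dominates").insert 3 "Triple Harmony Dominates").getD 3 "" = "Triple Harmony Dominates" := by decide
  by_cases h1 : (l.count 1 : Int) > (l.count 2 : Int) + (l.count 3 : Int)
  · have hmaj : 2 * (l.count 1 : Int) > (l.length : Int) := by
      have := hlen; push_cast [this]; omega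
    obtain ⟨hc, hv⟩ := pv_bm_major l 1 hmaj
    rw [if_pos h1, hc, if_pos ⟨hv, hmaj⟩, n1]
  · by_cases h2 : (l.count 2 : Int) > (l.count 1 : Int) + (l.count 3 : Int)
    · have hmaj : 2 * (l.count 2 : Int) > (l.length : Int) := by
        have := hlen; push_cast [this]; omega
      obtain ⟨hc, hv⟩ := pv_bm_major l 2 hmaj
      rw [if_neg h1, if_pos h2, hc, if_pos ⟨hv, hmaj⟩, n2]
    · by_cases h3 : (l.count 3 : Int) > (l.count 1 : Int) + (l.count 2 : Int)
      · have hmaj : 2 * (l.count 3 : Int) > (l.length : Int) := by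
          have := hlen; push_cast [this]; omega
        obtain ⟨hc, hv⟩ := pv_bm_major l 3 hmaj
        rw [if_neg h1, if_neg h2, if_pos h3, hc, if_pos ⟨hv, hmaj⟩, n3]
      · rw [if_neg h1, if_neg h2, if_neg h3]
        have hno : ¬ (st.2 > 0 ∧ 2 * (l.count st.1 : Int) > (l.length : Int)) := by
          rintro ⟨hv, hcnt⟩
          rcases pv_bm_mem l 0 0 with h0 | hm
          · rw [← hst] at h0
            have : (0 : Int) ∉ l := by
              intro hx; rcases hmem 0 hx with h | h | h <;> omega
            rw [h0, List.count_eq_zero.mpr this] at hcnt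
            have : (0 : Int) ≤ (l.length : Int) := by positivity
            omega
          · rw [← hst] at hm
            rcases hmem st.1 hm with h | h | h <;> rw [h] at hcnt <;>
              (have := hlen; push_cast [this] at hcnt; omega)
        rw [if_neg hno]
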